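-- pv_equiv track=rewrite | github.com/PNis0/BEVADAT2022232 | HAZI/HAZI01/HAZI01.py | by_parity
-- ===== SOURCE A (Python) =====
-- def by_parity(input_list):
--     output_dict={}
--     for i in input_list:
--         if(i%2==0):
--             output_dict["even"]=i
--         else:
--             output_dict["odd"]=i
--     return output_dict
-- ===== SOURCE B (Python) =====
-- def by_parity(input_list):
--     parities = dict.fromkeys(x % 2 for x in input_list)  # parities present, in order of first appearance
--     return {("even" if p == 0 else "odd"): next(x for x in reversed(input_list) if x % 2 == p)
--             for p in parities}
-- ===== Notes on version B (the rewrite author's own statement) =====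
-- stated objective: alternative
-- what changed: Replaces A's forward dict-overwrite loop with an ordered dedup of the parities present (dict.fromkeys) and, per present parity, a short-circuiting reverse scan for the last matching element.
import Mathlib
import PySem

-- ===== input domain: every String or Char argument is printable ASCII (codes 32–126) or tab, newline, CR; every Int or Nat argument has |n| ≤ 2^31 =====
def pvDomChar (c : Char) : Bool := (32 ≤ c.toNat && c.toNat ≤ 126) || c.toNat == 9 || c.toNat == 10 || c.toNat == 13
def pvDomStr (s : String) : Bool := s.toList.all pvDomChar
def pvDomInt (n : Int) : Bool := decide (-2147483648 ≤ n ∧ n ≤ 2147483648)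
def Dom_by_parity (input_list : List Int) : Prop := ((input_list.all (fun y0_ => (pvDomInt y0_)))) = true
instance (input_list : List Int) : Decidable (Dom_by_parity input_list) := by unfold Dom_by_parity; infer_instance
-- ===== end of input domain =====

-- B replaces A's forward dict-overwrite loop with an ordered dedup of the parities present plus, per parity, a short-circuiting reverse scan; alternative decomposition, same cost.

-- ===== PORT A =====
def by_parity (input_list : List Int) : List (String × Int) :=
  (input_list.foldl
    (fun output_dict i =>
      if PySem.Int.mod i 2 == 0 then PySem.Dict.insert output_dict "even" i
      else PySem.Dict.insert output_dict "odd" i)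
    PySem.Dict.empty).items

-- ===== PORT B =====
def by_parity_alt (input_list : List Int) : List (String × Int) :=
  let parities := PySem.List.dedup (input_list.map (fun x => PySem.Int.mod x 2))
  parities.map (fun p =>
    ((if p == 0 then "even" else "odd"),
     -- next(...) in Source B never raises: p is the parity of some element; .getD 0 is unreachable
     (input_list.reverse.find? (fun x => PySem.Int.mod x 2 == p)).getD 0))

-- ===== PRECONDITION & SPEC =====
def Spec_by_parity (input_list : List Int) (out : List (String × Int)) : Prop := out = by_parity_alt input_list
instance (input_list : List Int) (out : List (String × Int)) : Decidable (Spec_by_parity input_list out) := by unfold Spec_by_parity; infer_instance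

-- ===== CLAIM (what is proved, stated in full; the proofs are below) =====
def Claim_equal_by_parity : Prop := ∀ (input_list : List Int), Dom_by_parity input_list → Spec_by_parity input_list (by_parity input_list)

-- ===== LEMMAS AND PROOFS =====

-- proof-side canonical form of the result: last even / last odd, keyed order by the first element's parity
def pvCanon (input_list : List Int) : List (String × Int) :=
  let even := input_list.reverse.find? (fun x => PySem.Int.mod x 2 == 0)
  let odd  := input_list.reverse.find? (fun x => PySem.Int.mod x 2 != 0)
  match even, odd with
  | none, none => []
  | some e, none => [("even", e)]
  | none, some o => [("odd", o)]
  | some e, some o =>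
      if PySem.Int.mod input_list.headI 2 == 0 then [("even", e), ("odd", o)]
      else [("odd", o), ("even", e)]

theorem a_eq_canon (l : List Int) : by_parity l = pvCanon l := by
  induction l using List.reverseRecOn with
  | nil => rfl
  | append_singleton l x ih =>
    have hstep : by_parity (l ++ [x]) =
        (if PySem.Int.mod x 2 == 0
         then PySem.Dict.insert (PySem.Dict.mk (by_parity l)) "even" x
         else PySem.Dict.insert (PySem.Dict.mk (by_parity l)) "odd" x).items := by
      simp only [by_parity, List.foldl_append, List.foldl_cons, List.foldl_nil]
    rw [hstep, ih]
    have hrev : (l ++ [x]).reverse = x :: l.reverse := by simp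
    have hbr := PySem.Int.mod_eq_emod_of_pos (a := x) (b := 2) (by norm_num)
    have hpar : PySem.Int.mod x 2 = 0 ∨ PySem.Int.mod x 2 = 1 := by omega
    cases hE : l.reverse.find? (fun y => PySem.Int.mod y 2 == 0) with
    | none =>
      cases hO : l.reverse.find? (fun y => PySem.Int.mod y 2 != 0) with
      | none =>
        have hnil : l = [] := by
          cases hl : l with
          | nil => rfl
          | cons a t =>
            exfalso
            have ha : a ∈ l.reverse := by simp [hl]
            have h2 := List.find?_eq_none.mp hE a ha
            have h3 := List.find?_eq_none.mp hO a ha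
            simp at h2 h3
            omega
        subst hnil
        rcases hpar with hp | hp
        · have hbE : (PySem.Int.mod x 2 == 0) = true := by rw [hp]; rfl
          have hbO : (PySem.Int.mod x 2 != 0) = false := by rw [hp]; rfl
          have hd : 2 ∣ x := by omega
          simp [pvCanon, List.find?, hbE, hbO, hd, PySem.Dict.insert]
        · have hbE : (PySem.Int.mod x 2 == 0) = false := by rw [hp]; rfl
          have hbO : (PySem.Int.mod x 2 != 0) = true := by rw [hp]; rfl
          have hd : ¬ 2 ∣ x := by omega
          have hm : x % 2 = 1 := by omega
          simp [pvCanon, List.find?, hbE, hbO, hd, hm, PySem.Dict.insert]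
      | some o =>
        have hlo : ∀ a ∈ l, PySem.Int.mod a 2 = 1 := by
          intro a ha
          have h2 := List.find?_eq_none.mp hE a (by simp [ha])
          have hbr2 := PySem.Int.mod_eq_emod_of_pos (a := a) (b := 2) (by norm_num)
          have h4 : PySem.Int.mod a 2 ≠ 0 := by
            intro hc; simp [hc] at h2; omega
          omega
        have hlne : l ≠ [] := by
          intro h; subst h; simp at hO
        have hhead : PySem.Int.mod l.headI 2 = 1 := by
          cases l with
          | nil => exact absurd rfl hlne
          | cons a t => exact hlo a (by simp)
        have hbrh := PySem.Int.mod_eq_emod_of_pos (a := l.headI) (b := 2) (by norm_num)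
        have hdh : ¬ 2 ∣ l.headI := by omega
        have hheadapp : (l ++ [x]).headI = l.headI := by
          cases l with
          | nil => exact absurd rfl hlne
          | cons a t => rfl
        have hbH : (PySem.Int.mod l.headI 2 == 0) = false := by rw [hhead]; rfl
        rcases hpar with hp | hp
        · have hbE : (PySem.Int.mod x 2 == 0) = true := by rw [hp]; rfl
          have hbO : (PySem.Int.mod x 2 != 0) = false := by rw [hp]; rfl
          have hd : 2 ∣ x := by omega
          simp only [pvCanon, hrev, List.find?, hbE, hbO, hE, hO, hheadapp]
          simp [hbH, hd, hdh, PySem.Dict.insert]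
        · have hbE : (PySem.Int.mod x 2 == 0) = false := by rw [hp]; rfl
          have hbO : (PySem.Int.mod x 2 != 0) = true := by rw [hp]; rfl
          have hd : ¬ 2 ∣ x := by omega
          simp only [pvCanon, hrev, List.find?, hbE, hbO, hE, hO, hheadapp]
          simp [hbH, hd, hdh, PySem.Dict.insert]
    | some e =>
      cases hO : l.reverse.find? (fun y => PySem.Int.mod y 2 != 0) with
      | none =>
        have hlo : ∀ a ∈ l, PySem.Int.mod a 2 = 0 := by
          intro a ha
          have h2 := List.find?_eq_none.mp hO a (by simp [ha])
          have hbr2 := PySem.Int.mod_eq_emod_of_pos (a := a) (b := 2) (by norm_num)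
          by_contra hc
          simp [bne, hc] at h2
          omega
        have hlne : l ≠ [] := by
          intro h; subst h; simp at hE
        have hhead : PySem.Int.mod l.headI 2 = 0 := by
          cases l with
          | nil => exact absurd rfl hlne
          | cons a t => exact hlo a (by simp)
        have hbrh := PySem.Int.mod_eq_emod_of_pos (a := l.headI) (b := 2) (by norm_num)
        have hdh : 2 ∣ l.headI := by omega
        have hheadapp : (l ++ [x]).headI = l.headI := by
          cases l with
          | nil => exact absurd rfl hlne
          | cons a t => rfl
        have hbH : (PySem.Int.mod l.headI 2 == 0) = true := by rw [hhead]; rfl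
        rcases hpar with hp | hp
        · have hbE : (PySem.Int.mod x 2 == 0) = true := by rw [hp]; rfl
          have hbO : (PySem.Int.mod x 2 != 0) = false := by rw [hp]; rfl
          have hd : 2 ∣ x := by omega
          simp only [pvCanon, hrev, List.find?, hbE, hbO, hE, hO, hheadapp]
          simp [hbH, hd, hdh, PySem.Dict.insert]
        · have hbE : (PySem.Int.mod x 2 == 0) = false := by rw [hp]; rfl
          have hbO : (PySem.Int.mod x 2 != 0) = true := by rw [hp]; rfl
          have hd : ¬ 2 ∣ x := by omega
          simp only [pvCanon, hrev, List.find?, hbE, hbO, hE, hO, hheadapp]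
          simp [hbH, hd, hdh, PySem.Dict.insert]
      | some o =>
        have hlne : l ≠ [] := by
          intro h; subst h; simp at hE
        have hheadapp : (l ++ [x]).headI = l.headI := by
          cases l with
          | nil => exact absurd rfl hlne
          | cons a t => rfl
        have hbrh := PySem.Int.mod_eq_emod_of_pos (a := l.headI) (b := 2) (by norm_num)
        by_cases hh : PySem.Int.mod l.headI 2 = 0
        · have hbH : (PySem.Int.mod l.headI 2 == 0) = true := by rw [hh]; rfl
          have hdh : 2 ∣ l.headI := by omega
          rcases hpar with hp | hp
          · have hbE : (PySem.Int.mod x 2 == 0) = true := by rw [hp]; rfl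
            have hbO : (PySem.Int.mod x 2 != 0) = false := by rw [hp]; rfl
            have hd : 2 ∣ x := by omega
            simp only [pvCanon, hrev, List.find?, hbE, hbO, hE, hO, hheadapp]
            simp [hbH, hd, hdh, PySem.Dict.insert]
          · have hbE : (PySem.Int.mod x 2 == 0) = false := by rw [hp]; rfl
            have hbO : (PySem.Int.mod x 2 != 0) = true := by rw [hp]; rfl
            have hd : ¬ 2 ∣ x := by omega
            simp only [pvCanon, hrev, List.find?, hbE, hbO, hE, hO, hheadapp]
            simp [hbH, hd, hdh, PySem.Dict.insert]
        · have hm : PySem.Int.mod l.headI 2 = 1 := by omega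
          have hbH : (PySem.Int.mod l.headI 2 == 0) = false := by rw [hm]; rfl
          have hdh : ¬ 2 ∣ l.headI := by omega
          rcases hpar with hp | hp
          · have hbE : (PySem.Int.mod x 2 == 0) = true := by rw [hp]; rfl
            have hbO : (PySem.Int.mod x 2 != 0) = false := by rw [hp]; rfl
            have hd : 2 ∣ x := by omega
            simp only [pvCanon, hrev, List.find?, hbE, hbO, hE, hO, hheadapp]
            simp [hbH, hd, hdh, PySem.Dict.insert]
          · have hbE : (PySem.Int.mod x 2 == 0) = false := by rw [hp]; rfl
            have hbO : (PySem.Int.mod x 2 != 0) = true := by rw [hp]; rfl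
            have hd : ¬ 2 ∣ x := by omega
            simp only [pvCanon, hrev, List.find?, hbE, hbO, hE, hO, hheadapp]
            simp [hbH, hd, hdh, PySem.Dict.insert]

-- the two parity predicates agree on every Int
theorem pred_odd_eq : (fun x : Int => PySem.Int.mod x 2 != 0) = (fun x => PySem.Int.mod x 2 == 1) := by
  funext x
  have := PySem.Int.mod_eq_emod_of_pos (a := x) (b := 2) (by norm_num)
  have h : PySem.Int.mod x 2 = 0 ∨ PySem.Int.mod x 2 = 1 := by omega
  rcases h with h | h <;> rw [h] <;> rfl

theorem foldl_add_id (xs s : List Int) (h : ∀ x ∈ xs, x ∈ s) : xs.foldl PySem.Set.add s = s := by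
  induction xs generalizing s with
  | nil => rfl
  | cons x xs ih =>
    have hx : PySem.Set.add s x = s := by
      simp [PySem.Set.add, PySem.Set.contains, h x (by simp)]
    rw [List.foldl_cons, hx]
    exact ih s (fun y hy => h y (by simp [hy]))

theorem foldl_add_pair (a b : Int) (hne : a ≠ b) (xs : List Int)
    (h : ∀ x ∈ xs, x = a ∨ x = b) (hb : b ∈ xs) : xs.foldl PySem.Set.add [a] = [a, b] := by
  induction xs with
  | nil => simp at hb
  | cons x xs ih =>
    rcases h x (by simp) with hx | hx
    · subst hx
      have hadd : PySem.Set.add [x] x = [x] := by simp [PySem.Set.add, PySem.Set.contains]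
      rw [List.foldl_cons, hadd]
      have hb' : b ∈ xs := by
        rcases List.mem_cons.mp hb with h1 | h1
        · exact absurd h1.symm hne
        · exact h1
      exact ih (fun y hy => h y (by simp [hy])) hb'
    · subst hx
      have hadd : PySem.Set.add [a] x = [a, x] := by
        simp [PySem.Set.add, PySem.Set.contains, Ne.symm hne]
      rw [List.foldl_cons, hadd]
      exact foldl_add_id xs [a, x] (fun y hy => by rcases h y (by simp [hy]) with h1 | h1 <;> simp [h1])

theorem dedup_const (c : Int) (l : List Int) (hne : l ≠ []) (h : ∀ x ∈ l, x = c) :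
    PySem.List.dedup l = [c] := by
  cases l with
  | nil => exact absurd rfl hne
  | cons a xs =>
    have ha : a = c := h a (by simp)
    subst ha
    have h0 : PySem.Set.add [] a = [a] := by simp [PySem.Set.add, PySem.Set.contains]
    calc PySem.List.dedup (a :: xs) = (a :: xs).foldl PySem.Set.add [] := rfl
      _ = xs.foldl PySem.Set.add [a] := by rw [List.foldl_cons, h0]
      _ = [a] := foldl_add_id xs [a] (fun y hy => by simp [h y (by simp [hy])])

theorem dedup_two (a b : Int) (hne : a ≠ b) (l : List Int)
    (h : ∀ x ∈ l, x = a ∨ x = b) (hhead : l.headI = a) (hl : l ≠ []) (hb : b ∈ l) :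
    PySem.List.dedup l = [a, b] := by
  cases l with
  | nil => exact absurd rfl hl
  | cons x xs =>
    have hx : x = a := hhead
    subst hx
    have hb' : b ∈ xs := by
      rcases List.mem_cons.mp hb with h1 | h1
      · exact absurd h1.symm hne
      · exact h1
    have h0 : PySem.Set.add [] x = [x] := by simp [PySem.Set.add, PySem.Set.contains]
    calc PySem.List.dedup (x :: xs) = (x :: xs).foldl PySem.Set.add [] := rfl
      _ = xs.foldl PySem.Set.add [x] := by rw [List.foldl_cons, h0]
      _ = [x, b] := foldl_add_pair x b hne xs (fun y hy => h y (by simp [hy])) hb'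

theorem alt_eq_canon (l : List Int) : by_parity_alt l = pvCanon l := by
  have hall : ∀ x ∈ l.map (fun y => PySem.Int.mod y 2), x = 0 ∨ x = 1 := by
    intro x hx
    rcases List.mem_map.mp hx with ⟨y, _, hy⟩
    have := PySem.Int.mod_eq_emod_of_pos (a := y) (b := 2) (by norm_num)
    omega
  cases hE : l.reverse.find? (fun x => PySem.Int.mod x 2 == 0) with
  | none =>
    cases hO : l.reverse.find? (fun x => PySem.Int.mod x 2 != 0) with
    | none =>
      have hnil : l = [] := by
        cases hl : l with
        | nil => rfl
        | cons a t =>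
          exfalso
          have ha : a ∈ l.reverse := by simp [hl]
          have h2 := List.find?_eq_none.mp hE a ha
          have h3 := List.find?_eq_none.mp hO a ha
          have := PySem.Int.mod_eq_emod_of_pos (a := a) (b := 2) (by norm_num)
          simp at h2 h3
          omega
      subst hnil
      rfl
    | some o =>
      -- all odd
      have hlo : ∀ a ∈ l, PySem.Int.mod a 2 = 1 := by
        intro a ha
        have h2 := List.find?_eq_none.mp hE a (by simp [ha])
        have := PySem.Int.mod_eq_emod_of_pos (a := a) (b := 2) (by norm_num)
        have h4 : PySem.Int.mod a 2 ≠ 0 := by intro hc; simp [hc] at h2; omega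
        omega
      have hlne : l ≠ [] := by intro h; subst h; simp at hO
      have hded : PySem.List.dedup (l.map (fun y => PySem.Int.mod y 2)) = [1] := by
        apply dedup_const
        · simp [hlne]
        · intro x hx
          rcases List.mem_map.mp hx with ⟨y, hy, hxy⟩
          rw [← hxy]; exact hlo y hy
      simp only [by_parity_alt, hded, List.map_cons, List.map_nil, ← pred_odd_eq, hO, pvCanon, hE]
      rfl
  | some e =>
    cases hO : l.reverse.find? (fun x => PySem.Int.mod x 2 != 0) with
    | none =>
      -- all even
      have hlo : ∀ a ∈ l, PySem.Int.mod a 2 = 0 := by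
        intro a ha
        have h2 := List.find?_eq_none.mp hO a (by simp [ha])
        have := PySem.Int.mod_eq_emod_of_pos (a := a) (b := 2) (by norm_num)
        by_contra hc
        simp [bne, hc] at h2
        omega
      have hlne : l ≠ [] := by intro h; subst h; simp at hE
      have hded : PySem.List.dedup (l.map (fun y => PySem.Int.mod y 2)) = [0] := by
        apply dedup_const
        · simp [hlne]
        · intro x hx
          rcases List.mem_map.mp hx with ⟨y, hy, hxy⟩
          rw [← hxy]; exact hlo y hy
      simp only [by_parity_alt, hded, List.map_cons, List.map_nil, hE, pvCanon, hO]
      rfl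
    | some oo =>
      -- mixed: both parities occur
      have hlne : l ≠ [] := by intro h; subst h; simp at hE
      have hmemE : (0 : Int) ∈ l.map (fun y => PySem.Int.mod y 2) := by
        have he := List.find?_some hE
        have hme : e ∈ l := by
          have := List.mem_of_find?_eq_some hE
          simpa using this
        have : PySem.Int.mod e 2 = 0 := by simpa using he
        exact List.mem_map.mpr ⟨e, hme, this⟩
      have hmemO : (1 : Int) ∈ l.map (fun y => PySem.Int.mod y 2) := by
        have ho := List.find?_some hO
        have hmo : oo ∈ l := by
          have := List.mem_of_find?_eq_some hO
          simpa using this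
        have hbr := PySem.Int.mod_eq_emod_of_pos (a := oo) (b := 2) (by norm_num)
        have : PySem.Int.mod oo 2 = 1 := by
          have h4 : PySem.Int.mod oo 2 ≠ 0 := by
            intro hc; rw [hc] at ho; simp at ho
          omega
        exact List.mem_map.mpr ⟨oo, hmo, this⟩
      have hheadmap : (l.map (fun y => PySem.Int.mod y 2)).headI = PySem.Int.mod l.headI 2 := by
        cases l with
        | nil => exact absurd rfl hlne
        | cons a t => rfl
      have hmapne : l.map (fun y => PySem.Int.mod y 2) ≠ [] := by simp [hlne]
      have hbrh := PySem.Int.mod_eq_emod_of_pos (a := l.headI) (b := 2) (by norm_num)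
      by_cases hh : PySem.Int.mod l.headI 2 = 0
      · have hded : PySem.List.dedup (l.map (fun y => PySem.Int.mod y 2)) = [0, 1] := by
          apply dedup_two 0 1 (by norm_num) _ hall (by rw [hheadmap, hh]) hmapne hmemO
        have hbH : (PySem.Int.mod l.headI 2 == 0) = true := by rw [hh]; rfl
        simp only [by_parity_alt, hded, List.map_cons, List.map_nil, hE, ← pred_odd_eq, hO,
          pvCanon, hbH]
        rfl
      · have hm1 : PySem.Int.mod l.headI 2 = 1 := by omega
        have hded : PySem.List.dedup (l.map (fun y => PySem.Int.mod y 2)) = [1, 0] := by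
          apply dedup_two 1 0 (by norm_num) _ (fun x hx => (hall x hx).symm)
            (by rw [hheadmap, hm1]) hmapne hmemE
        have hbH : (PySem.Int.mod l.headI 2 == 0) = false := by rw [hm1]; rfl
        simp only [by_parity_alt, hded, List.map_cons, List.map_nil, hE, ← pred_odd_eq, hO,
          pvCanon, hbH]
        rfl

-- ===== VERDICT (by name: the statement is the Claim_ definition above) =====
theorem by_parity_spec : Claim_equal_by_parity := by
  intro l _
  unfold Spec_by_parity
  rw [a_eq_canon, alt_eq_canon]
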